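-- pv_equiv track=rewrite | github.com/zbrandt/advent-of-code | 2025/day08/day08.py | group_connected_pairs
-- ===== SOURCE A (Python) =====
-- import math
--
-- def group_connected_pairs(pairs, checkpoint):
--     groups = []
--     p1 = p2 = 0
--
--     for pc, (a, b) in enumerate(pairs):
--         found_in_groups = []
--         fa = fb = False
--         for i, group in enumerate(groups):
--             if a in group or b in group:
--                 found_in_groups.append(i)
--             fa = fa or a in group
--             fb = fb or b in group
--
--         if not fa or not fb:
--             p2 = list(a)[0] * list(b)[0]
--
--         if not found_in_groups:
--             # Neither 'a' nor 'b' found in existing groups, create a new one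
--             groups.append({a, b})
--         elif len(found_in_groups) == 1:
--             # One group contains either 'a' or 'b', add the other element
--             groups[found_in_groups[0]].add(a)
--             groups[found_in_groups[0]].add(b)
--         else:
--             # Both 'a' and 'b' (or their connected elements) are in different groups,
--             # merge these groups and add any new elements
--             merged_group = set()
--             for index in sorted(found_in_groups, reverse=True):
--                 merged_group.update(groups.pop(index))
--             merged_group.add(a)
--             merged_group.add(b)
--             groups.append(merged_group)
--
--         if pc+1 == checkpoint:
--             p1 = math.prod(sorted([len(x) for x in groups], reverse=True)[:3])
--
--     return p1, p2
-- ===== SOURCE B (Python) =====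
-- import math
--
-- def group_connected_pairs(pairs, checkpoint):
--     comp = {}     # element -> component id (always current: "weighted quick-find" style)
--     members = {}  # component id -> list of its distinct elements
--     nxt = 0
--     p1 = p2 = 0
--     for pc, (a, b) in enumerate(pairs):
--         ra = comp.get(a)
--         rb = comp.get(b)
--         if ra is None or rb is None:
--             p2 = a[0] * b[0]
--         if ra is None and rb is None:
--             comp[a] = nxt
--             comp[b] = nxt
--             members[nxt] = [a] if a == b else [a, b]
--             nxt += 1
--         elif ra is None:
--             comp[a] = rb
--             members[rb].append(a)
--         elif rb is None:
--             comp[b] = ra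
--             members[ra].append(b)
--         elif ra != rb:
--             merged = members.pop(ra) + members.pop(rb)
--             for x in merged:
--                 comp[x] = nxt
--             members[nxt] = merged
--             nxt += 1
--         if pc + 1 == checkpoint:
--             p1 = math.prod(sorted(map(len, members.values()), reverse=True)[:3])
--     return p1, p2
-- ===== Notes on version B (the rewrite author's own statement) =====
-- stated objective: faster
-- what changed: B replaces A's per-pair scan over the whole list of group-sets with two dicts (element -> component id, id -> member list): membership tests become O(1) lookups, merges splice the two touched member lists under a fresh id, and p2 falls out of the id lookup instead of per-group scans.
import Mathlib
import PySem

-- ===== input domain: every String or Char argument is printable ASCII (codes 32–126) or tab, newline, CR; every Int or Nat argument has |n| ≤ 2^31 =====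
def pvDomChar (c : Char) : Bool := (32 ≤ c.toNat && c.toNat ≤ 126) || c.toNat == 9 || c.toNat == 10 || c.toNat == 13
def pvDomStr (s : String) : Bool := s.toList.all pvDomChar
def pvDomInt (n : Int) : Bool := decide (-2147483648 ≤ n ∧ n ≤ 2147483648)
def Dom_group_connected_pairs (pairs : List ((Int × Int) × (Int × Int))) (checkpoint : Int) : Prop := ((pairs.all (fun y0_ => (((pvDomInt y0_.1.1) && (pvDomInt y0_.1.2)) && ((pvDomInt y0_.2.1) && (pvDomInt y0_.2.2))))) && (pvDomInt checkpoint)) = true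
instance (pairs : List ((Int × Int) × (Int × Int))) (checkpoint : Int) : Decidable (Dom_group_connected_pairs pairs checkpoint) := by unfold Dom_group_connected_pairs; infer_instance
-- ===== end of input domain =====

-- B replaces A's per-pair scan of every group by two dict indexes (element -> component id,
-- id -> member list), merging by reindexing the two touched components; same return value.
-- ===== PORT A =====
-- literal transliteration of Source A (helpers pvProdTop3A, pvAStep are its inner expressions/loop body)

def pvProdTop3A (lens : List Int) : Int :=
  (PySem.List.slice (PySem.List.sorted lens (fun x => x) true) none (some 3)).foldl (· * ·) 1

def pvAStep (checkpoint : Int) (st : List (PySem.Set (Int × Int)) × Int × Int)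
    (pe : Int × ((Int × Int) × (Int × Int))) : List (PySem.Set (Int × Int)) × Int × Int :=
  let pc := pe.1; let a := pe.2.1; let b := pe.2.2
  let groups := st.1
  let scan := (PySem.List.enumerate groups 0).foldl
      (fun (acc : List Int × Bool × Bool) ig =>
        ((if PySem.Set.contains ig.2 a || PySem.Set.contains ig.2 b then acc.1 ++ [ig.1] else acc.1),
         (acc.2.1 || PySem.Set.contains ig.2 a),
         (acc.2.2 || PySem.Set.contains ig.2 b)))
      ([], false, false)
  let found := scan.1; let fa := scan.2.1; let fb := scan.2.2
  let p2 := if !fa || !fb then a.1 * b.1 else st.2.2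
  let groups :=
    if found.isEmpty then
      groups ++ [PySem.Set.ofList [a, b]]
    else if found.length == 1 then
      let i := PySem.List.pyGetD found 0 0
      PySem.List.pySetD groups i (PySem.Set.add (PySem.Set.add (PySem.List.pyGetD groups i []) a) b)
    else
      let res := (PySem.List.sorted found (fun x => x) true).foldl
          (fun (mg : PySem.Set (Int × Int) × List (PySem.Set (Int × Int))) idx =>
            match PySem.List.pop? mg.2 idx with
            | some r => (PySem.Set.update mg.1 r.1, r.2)
            | none => mg)
          (PySem.Set.empty, groups)
      res.2 ++ [PySem.Set.add (PySem.Set.add res.1 a) b]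
  let p1 := if pc + 1 == checkpoint then pvProdTop3A (groups.map (fun g => PySem.Set.len g)) else st.2.1
  (groups, p1, p2)

def group_connected_pairs (pairs : List ((Int × Int) × (Int × Int))) (checkpoint : Int) : Int × Int :=
  let r := (PySem.List.enumerate pairs 0).foldl (pvAStep checkpoint) ([], 0, 0)
  (r.2.1, r.2.2)

-- ===== PORT B =====
-- literal transliteration of Source B (Source B's top-3 product expression is the same as Source A's,
-- so both ports share pvProdTop3A)
def pvBStep (checkpoint : Int)
    (st : PySem.Dict (Int × Int) Int × PySem.Dict Int (List (Int × Int)) × Int × Int × Int)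
    (pe : Int × ((Int × Int) × (Int × Int))) :
    PySem.Dict (Int × Int) Int × PySem.Dict Int (List (Int × Int)) × Int × Int × Int :=
  let pc := pe.1; let a := pe.2.1; let b := pe.2.2
  let comp := st.1; let members := st.2.1; let nxt := st.2.2.1
  let ra := comp.get? a
  let rb := comp.get? b
  let p2 := if ra.isNone || rb.isNone then a.1 * b.1 else st.2.2.2.2
  let s : PySem.Dict (Int × Int) Int × PySem.Dict Int (List (Int × Int)) × Int :=
    match ra, rb with
    | none, none =>
        ((comp.insert a nxt).insert b nxt,
         members.insert nxt (if a == b then [a] else [a, b]), nxt + 1)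
    | none, some j => (comp.insert a j, members.modify j [] (fun l => l ++ [a]), nxt)
    | some i, none => (comp.insert b i, members.modify i [] (fun l => l ++ [b]), nxt)
    | some i, some j =>
        if i == j then (comp, members, nxt)
        else
          -- members.pop(ra)/pop(rb): the keys are always present, the [] default is unreachable
          let la := members.getD i []
          let members1 := members.erase i
          let lb := members1.getD j []
          let members2 := members1.erase j
          let merged := la ++ lb
          (merged.foldl (fun c x => c.insert x nxt) comp, members2.insert nxt merged, nxt + 1)
  let p1 := if pc + 1 == checkpoint then pvProdTop3A ((s.2.1.values).map (fun l => (l.length : Int))) else st.2.2.2.1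
  (s.1, s.2.1, s.2.2, p1, p2)

def group_connected_pairs_alt (pairs : List ((Int × Int) × (Int × Int))) (checkpoint : Int) : Int × Int :=
  let r := (PySem.List.enumerate pairs 0).foldl (pvBStep checkpoint) (PySem.Dict.empty, PySem.Dict.empty, 0, 0, 0)
  (r.2.2.2.1, r.2.2.2.2)

-- ===== PRECONDITION & SPEC =====
def Spec_group_connected_pairs (pairs : List ((Int × Int) × (Int × Int))) (checkpoint : Int) (out : Int × Int) : Prop := out = group_connected_pairs_alt pairs checkpoint
instance (pairs : List ((Int × Int) × (Int × Int))) (checkpoint : Int) (out : Int × Int) : Decidable (Spec_group_connected_pairs pairs checkpoint out) := by unfold Spec_group_connected_pairs; infer_instance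

-- ===== CLAIM (what is proved, stated in full; the proofs are below) =====
def Claim_equal_group_connected_pairs : Prop := ∀ (pairs : List ((Int × Int) × (Int × Int))) (checkpoint : Int), Dom_group_connected_pairs pairs checkpoint → Spec_group_connected_pairs pairs checkpoint (group_connected_pairs pairs checkpoint)

-- ===== LEMMAS AND PROOFS =====

-- relation between one of A's groups and one of B's (id, member-list) entries
def pvRel (g : PySem.Set (Int × Int)) (e : Int × List (Int × Int)) : Prop :=
  g.Nodup ∧ e.2.Nodup ∧ ∀ x, x ∈ g ↔ x ∈ e.2

-- simulation invariant between A's state and B's state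
def pvInv (groups : List (PySem.Set (Int × Int))) (comp : PySem.Dict (Int × Int) Int)
    (members : PySem.Dict Int (List (Int × Int))) (nxt : Int) : Prop :=
  List.Forall₂ pvRel groups members.items ∧
  (∀ (x : Int × Int) (id : Int), comp.get? x = some id ↔ ∃ e ∈ members.items, e.1 = id ∧ x ∈ e.2) ∧
  (members.items.map (fun p => p.1)).Nodup ∧
  (∀ e ∈ members.items, e.1 < nxt)

theorem pvScan_spec (a b : Int × Int) (groups : List (PySem.Set (Int × Int))) (s : Int)
    (acc : List Int) (fa fb : Bool) :
    (PySem.List.enumerate groups s).foldl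
      (fun (acc : List Int × Bool × Bool) ig =>
        ((if PySem.Set.contains ig.2 a || PySem.Set.contains ig.2 b then acc.1 ++ [ig.1] else acc.1),
         (acc.2.1 || PySem.Set.contains ig.2 a),
         (acc.2.2 || PySem.Set.contains ig.2 b)))
      (acc, fa, fb)
    = (acc ++ ((PySem.List.enumerate groups s).filter
          (fun ig => PySem.Set.contains ig.2 a || PySem.Set.contains ig.2 b)).map Prod.fst,
       fa || groups.any (fun g => PySem.Set.contains g a),
       fb || groups.any (fun g => PySem.Set.contains g b)) := by
  induction groups generalizing s acc fa fb with
  | nil => simp [PySem.List.enumerate]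
  | cons g t ih =>
    rw [PySem.List.enumerate_cons]
    simp only [List.foldl_cons, List.filter_cons, List.any_cons]
    cases hc : (PySem.Set.contains g a || PySem.Set.contains g b)
    · rw [if_neg (by simp), if_neg (by simp), ih]
      simp [Bool.or_assoc]
    · rw [if_pos (by simp), if_pos (by simp), ih]
      simp [Bool.or_assoc]

theorem pvKeyInj {e e' : Int × List (Int × Int)} {items : List (Int × List (Int × Int))}
    (hnd : (items.map (fun p => p.1)).Nodup) (he : e ∈ items) (he' : e' ∈ items)
    (hk : e.1 = e'.1) : e = e' := by
  induction items with
  | nil => cases he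
  | cons x t ih =>
    simp only [List.map_cons, List.nodup_cons] at hnd
    rcases List.mem_cons.1 he with rfl | he2 <;> rcases List.mem_cons.1 he' with rfl | he2'
    · rfl
    · exact absurd (hk ▸ List.mem_map_of_mem he2') hnd.1
    · exact absurd (hk ▸ List.mem_map_of_mem he2) hnd.1
    · exact ih hnd.2 he2 he2'

theorem pvMemIff {groups : List (PySem.Set (Int × Int))} {items : List (Int × List (Int × Int))}
    (h : List.Forall₂ pvRel groups items) (x : Int × Int) :
    (∃ g ∈ groups, x ∈ g) ↔ (∃ e ∈ items, x ∈ e.2) := by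
  induction h with
  | nil => simp
  | @cons g e gs es hr hf ih =>
    constructor
    · rintro ⟨g', hg', hx⟩
      rcases List.mem_cons.1 hg' with rfl | hg2
      · exact ⟨e, by simp, (hr.2.2 x).1 hx⟩
      · obtain ⟨e', he', hx'⟩ := ih.1 ⟨g', hg2, hx⟩
        exact ⟨e', by simp [he'], hx'⟩
    · rintro ⟨e', he', hx⟩
      rcases List.mem_cons.1 he' with rfl | he2
      · exact ⟨g, by simp, (hr.2.2 x).2 hx⟩
      · obtain ⟨g', hg', hx'⟩ := ih.2 ⟨e', he2, hx⟩
        exact ⟨g', by simp [hg'], hx'⟩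

theorem pvLens {groups : List (PySem.Set (Int × Int))} {items : List (Int × List (Int × Int))}
    (h : List.Forall₂ pvRel groups items) :
    groups.map PySem.Set.len = items.map (fun e => (e.2.length : Int)) := by
  induction h with
  | nil => rfl
  | cons hr _ ih =>
    obtain ⟨h1, h2, h3⟩ := hr
    have hp := (List.perm_ext_iff_of_nodup h1 h2).2 h3
    simp [PySem.Set.len, ih, hp.length_eq]

theorem pvGetFoldlInsert (l : List (Int × Int)) (v : Int) (c : PySem.Dict (Int × Int) Int)
    (y : Int × Int) :
    (l.foldl (fun c x => c.insert x v) c).get? y = if y ∈ l then some v else c.get? y := by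
  induction l generalizing c with
  | nil => simp
  | cons x t ih =>
    simp only [List.foldl_cons, ih, List.mem_cons]
    by_cases hy : y ∈ t
    · simp [hy]
    · by_cases hx : y = x <;> simp [hy, hx, PySem.Dict.get?_insert]

theorem pvEraseIdxFilter₁ {α : Type} (p : α → Bool) (l : List α) (u : Nat) (hu : u < l.length)
    (hp : ∀ (k : Nat) (h : k < l.length), p l[k] = true ↔ k = u) :
    l.eraseIdx u = l.filter (fun x => !p x) := by
  induction l generalizing u with
  | nil => simp at hu
  | cons x t ih =>
    cases u with
    | zero =>
      have hx : p x = true := by simpa using (hp 0 (by simp)).2 rfl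
      have ht : ∀ y ∈ t, p y = false := by
        intro y hy
        obtain ⟨k, hk, rfl⟩ := List.mem_iff_getElem.1 hy
        by_contra hcon
        rw [Bool.not_eq_false] at hcon
        have := (hp (k+1) (by simp only [List.length_cons]; omega)).1 (by simpa using hcon)
        omega
      rw [List.eraseIdx_cons_zero, List.filter_cons, if_neg (by simp [hx])]
      rw [List.filter_eq_self.2 (by intro y hy; simp [ht y hy])]
    | succ u' =>
      have hx : p x = false := by
        by_contra hcon
        rw [Bool.not_eq_false] at hcon
        have := (hp 0 (by simp)).1 (by simpa using hcon)
        omega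
      rw [List.eraseIdx_cons_succ, List.filter_cons, if_pos (by simp [hx])]
      congr 1
      exact ih u' (by simpa using hu)
        (fun k h => by
          have h2 := hp (k+1) (by simp only [List.length_cons]; omega)
          simp only [List.getElem_cons_succ] at h2
          rw [h2]; omega)

theorem pvEraseIdxFilter₂ {α : Type} (p : α → Bool) (l : List α) (u v : Nat) (huv : u < v)
    (hv : v < l.length)
    (hp : ∀ (k : Nat) (h : k < l.length), p l[k] = true ↔ (k = u ∨ k = v)) :
    (l.eraseIdx v).eraseIdx u = l.filter (fun x => !p x) := by
  induction l generalizing u v with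
  | nil => simp at hv
  | cons x t ih =>
    obtain ⟨v', rfl⟩ : ∃ v', v = v' + 1 := ⟨v - 1, by omega⟩
    cases u with
    | zero =>
      have hx : p x = true := by simpa using (hp 0 (by simp)).2 (Or.inl rfl)
      rw [List.eraseIdx_cons_succ, List.filter_cons, if_neg (by simp [hx]), List.eraseIdx_cons_zero]
      exact pvEraseIdxFilter₁ p t v' (by simp only [List.length_cons] at hv; omega)
        (fun k h => by
          have h2 := hp (k+1) (by simp only [List.length_cons]; omega)
          simp only [List.getElem_cons_succ] at h2
          rw [h2]; omega)
    | succ u' =>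
      have hx : p x = false := by
        by_contra hcon
        rw [Bool.not_eq_false] at hcon
        rcases (hp 0 (by simp)).1 (by simpa using hcon) with h0 | h0 <;> omega
      rw [List.eraseIdx_cons_succ, List.eraseIdx_cons_succ, List.filter_cons,
        if_pos (by simp [hx])]
      congr 1
      exact ih u' v' (by omega) (by simp only [List.length_cons] at hv; omega)
        (fun k h => by
          have h2 := hp (k+1) (by simp only [List.length_cons]; omega)
          simp only [List.getElem_cons_succ] at h2
          rw [h2]; omega)

theorem pvForall₂Filter {groups : List (PySem.Set (Int × Int))}
    {items : List (Int × List (Int × Int))}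
    (pA : PySem.Set (Int × Int) → Bool) (pB : Int × List (Int × Int) → Bool)
    (h : List.Forall₂ pvRel groups items)
    (hag : ∀ g e, pvRel g e → e ∈ items → pA g = pB e) :
    List.Forall₂ pvRel (groups.filter pA) (items.filter pB) := by
  induction h with
  | nil => exact List.Forall₂.nil
  | @cons g e gs es hr hf ih =>
    simp only [List.filter_cons]
    have hge := hag g e hr (by simp)
    have ih' := ih fun g' e' hr' he' => hag g' e' hr' (by simp [he'])
    by_cases hA : pA g = true
    · rw [hA, ← hge, hA]
      exact List.Forall₂.cons hr ih'
    · rw [Bool.not_eq_true] at hA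
      rw [hA, ← hge, hA]
      exact ih'

theorem pvForall₂Set {groups : List (PySem.Set (Int × Int))}
    {items : List (Int × List (Int × Int))} {k : Nat}
    {g : PySem.Set (Int × Int)} {e : Int × List (Int × Int)}
    (h : List.Forall₂ pvRel groups items) (hr : pvRel g e) :
    List.Forall₂ pvRel (groups.set k g) (items.set k e) := by
  rcases List.forall₂_iff_get.1 h with ⟨hlen, hget⟩
  refine List.forall₂_of_length_eq_of_get (by simp [hlen]) ?_
  intro i h1 h2
  simp only [List.get_eq_getElem, List.getElem_set]
  split_ifs with hik
  · exact hr
  · exact hget i (by simpa using h1) (by simpa using h2)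

theorem pvMapIfSet (items : List (Int × List (Int × Int))) (j : Int)
    (w : Int × List (Int × Int)) (k : Nat) (hk : k < items.length)
    (hnd : (items.map (fun p => p.1)).Nodup) (hkey : items[k].1 = j) :
    items.map (fun p => if p.1 == j then w else p) = items.set k w := by
  induction items generalizing k with
  | nil => rfl
  | cons x t ih =>
    simp only [List.map_cons, List.nodup_cons, List.map_cons] at hnd
    cases k with
    | zero =>
      simp only [List.getElem_cons_zero] at hkey
      have ht : ∀ p ∈ t, (if (p.1 == j) = true then w else p) = p := by
        intro p hp
        rw [if_neg]
        simp only [beq_iff_eq]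
        intro hpj
        refine hnd.1 ?_
        rw [hkey, ← hpj]
        exact List.mem_map_of_mem hp
      rw [List.set_cons_zero, List.map_cons, if_pos (by simp [hkey])]
      congr 1
      calc t.map _ = t.map id := List.map_congr_left ht
        _ = t := List.map_id t
    | succ k' =>
      simp only [List.getElem_cons_succ] at hkey
      have hx : (x.1 == j) = false := by
        simp only [beq_eq_false_iff_ne]
        intro hxj
        refine hnd.1 ?_
        rw [hxj, ← hkey]
        exact List.mem_map_of_mem (List.getElem_mem _)
      rw [List.set_cons_succ, List.map_cons, if_neg (by simp [hx])]
      congr 1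
      exact ih k' (by simpa using hk) hnd.2 hkey

theorem pvEqSingleton (l : List Int) (hp : l.Pairwise (· < ·)) (x : Int)
    (hm : ∀ y, y ∈ l ↔ y = x) : l = [x] := by
  cases l with
  | nil => exact absurd ((hm x).2 rfl) (by simp)
  | cons z t =>
    have hz : z = x := (hm z).1 (by simp)
    subst hz
    cases t with
    | nil => rfl
    | cons w t' =>
      have hw : w = z := (hm w).1 (by simp)
      have := (List.pairwise_cons.1 hp).1 w (by simp)
      omega

theorem pvEqPair (l : List Int) (hp : l.Pairwise (· < ·)) (u v : Int) (huv : u < v)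
    (hm : ∀ y, y ∈ l ↔ (y = u ∨ y = v)) : l = [u, v] := by
  cases l with
  | nil => exact absurd ((hm u).2 (Or.inl rfl)) (by simp)
  | cons z t =>
    obtain ⟨hzlt, hpt⟩ := List.pairwise_cons.1 hp
    have hzm := (hm z).1 (by simp)
    have hut := (hm u).2 (Or.inl rfl)
    have hvt := (hm v).2 (Or.inr rfl)
    have hz : z = u := by
      rcases hzm with rfl | rfl
      · rfl
      · rcases List.mem_cons.1 hut with rfl | hut2
        · rfl
        · have := hzlt u hut2; omega
    subst hz
    have ht : t = [v] := by
      refine pvEqSingleton t hpt v ?_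
      intro y
      constructor
      · intro hy
        rcases (hm y).1 (List.mem_cons_of_mem _ hy) with rfl | rfl
        · have := hzlt y hy; omega
        · rfl
      · intro hy; subst hy
        rcases List.mem_cons.1 hvt with rfl | h2
        · omega
        · exact h2
    rw [ht]

theorem pvContainsIff {groups : List (PySem.Set (Int × Int))} {comp : PySem.Dict (Int × Int) Int}
    {members : PySem.Dict Int (List (Int × Int))} {nxt : Int}
    (h : pvInv groups comp members nxt)
    (k : Nat) (hk : k < groups.length) (hk2 : k < members.items.length) (x : Int × Int) :
    (PySem.Set.contains groups[k] x = true) ↔ comp.get? x = some (members.items[k].1) := by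
  obtain ⟨hf, hc, hnd, -⟩ := h
  rw [PySem.Set.contains_iff]
  constructor
  · intro hx
    exact (hc x _).2 ⟨members.items[k], List.getElem_mem _, rfl,
      ((List.Forall₂.get hf hk hk2).2.2 x).1 hx⟩
  · intro hx
    obtain ⟨e, he, hek, hxe⟩ := (hc x _).1 hx
    have heq : e = members.items[k] := pvKeyInj hnd he (List.getElem_mem _) (by rw [hek])
    subst heq
    exact ((List.Forall₂.get hf hk hk2).2.2 x).2 hxe


theorem pvAnyIsSome {groups : List (PySem.Set (Int × Int))} {comp : PySem.Dict (Int × Int) Int}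
    {members : PySem.Dict Int (List (Int × Int))}
    (hf : List.Forall₂ pvRel groups members.items)
    (hc : ∀ (x : Int × Int) (id : Int), comp.get? x = some id ↔ ∃ e ∈ members.items, e.1 = id ∧ x ∈ e.2)
    (x : Int × Int) :
    (groups.any fun g => PySem.Set.contains g x) = (comp.get? x).isSome := by
  rcases hx : comp.get? x with _ | i
  · rw [Option.isSome_none, Bool.eq_false_iff]
    intro hany
    obtain ⟨g, hg, hgx⟩ := List.any_eq_true.1 hany
    obtain ⟨e, he, hxe⟩ := (pvMemIff hf x).1 ⟨g, hg, (PySem.Set.contains_iff g x).1 hgx⟩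
    rw [(hc x e.1).2 ⟨e, he, rfl, hxe⟩] at hx
    cases hx
  · obtain ⟨e, he, -, hxe⟩ := (hc x i).1 hx
    obtain ⟨g, hg, hgx⟩ := (pvMemIff hf x).2 ⟨e, he, hxe⟩
    rw [Option.isSome_some]
    exact List.any_eq_true.2 ⟨g, hg, (PySem.Set.contains_iff g x).2 hgx⟩

theorem pvKeyPos {items : List (Int × List (Int × Int))}
    (hnd : (items.map (fun p => p.1)).Nodup) {k k' : Nat}
    (hk : k < items.length) (hk' : k' < items.length) (he : items[k].1 = items[k'].1) :
    k = k' := by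
  have h1 : (items.map (fun p => p.1))[k]'(by simpa using hk)
      = (items.map (fun p => p.1))[k']'(by simpa using hk') := by
    simpa using he
  exact (hnd.getElem_inj_iff).1 h1

theorem pvFoundPairwise (a b : Int × Int) (groups : List (PySem.Set (Int × Int))) :
    (List.map Prod.fst (List.filter (fun ig => PySem.Set.contains ig.2 a || PySem.Set.contains ig.2 b)
      (PySem.List.enumerate groups 0))).Pairwise (· < ·) := by
  exact List.Pairwise.map _ (fun p q hpq => hpq)
    (List.Pairwise.filter _ (PySem.List.pairwise_lt_enumerate groups 0))

theorem pvFoundMem (a b : Int × Int) (groups : List (PySem.Set (Int × Int))) (y : Int) :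
    y ∈ List.map Prod.fst (List.filter (fun ig => PySem.Set.contains ig.2 a || PySem.Set.contains ig.2 b)
      (PySem.List.enumerate groups 0)) ↔
    ∃ (k : Nat) (hk : k < groups.length), y = (k : Int) ∧
      (PySem.Set.contains groups[k] a || PySem.Set.contains groups[k] b) = true := by
  simp only [List.mem_map, List.mem_filter, PySem.List.mem_enumerate_iff]
  constructor
  · rintro ⟨⟨ky, g⟩, ⟨⟨k, hk, heq⟩, hpred⟩, rfl⟩
    obtain ⟨h1, h2⟩ := Prod.mk.injEq .. ▸ heq
    refine ⟨k, hk, by omega, ?_⟩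
    rw [← h2]; exact hpred
  · rintro ⟨k, hk, rfl, hpred⟩
    exact ⟨((k : Int), groups[k]), ⟨⟨k, hk, by simp⟩, hpred⟩, rfl⟩

theorem pvExistsMemSet {α : Type} (l : List α) (k : Nat) (hk : k < l.length) (w : α)
    (P : α → Prop) :
    (∃ e ∈ l.set k w, P e) ↔ (P w ∨ ∃ (k' : Nat) (h : k' < l.length), k' ≠ k ∧ P l[k']) := by
  constructor
  · rintro ⟨e, he, hP⟩
    obtain ⟨k', hk', hge⟩ := List.mem_iff_getElem.1 he
    rw [List.getElem_set] at hge
    by_cases hkk : k = k'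
    · left; rw [if_pos hkk] at hge; rw [← hge] at hP; exact hP
    · right
      rw [if_neg hkk] at hge
      exact ⟨k', by simpa using hk', fun hh => hkk hh.symm, hge ▸ hP⟩
  · rintro (hP | ⟨k', h, hne, hP⟩)
    · refine ⟨w, List.mem_iff_getElem.2 ⟨k, by simpa using hk, ?_⟩, hP⟩
      rw [List.getElem_set, if_pos rfl]
    · refine ⟨l[k'], List.mem_iff_getElem.2 ⟨k', by simpa using h, ?_⟩, hP⟩
      rw [List.getElem_set, if_neg (fun hh => hne hh.symm)]

theorem pvForall₂Append {l1 l3 : List (PySem.Set (Int × Int))} {l2 l4 : List (Int × List (Int × Int))}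
    (h : List.Forall₂ pvRel l1 l2) (h2 : List.Forall₂ pvRel l3 l4) :
    List.Forall₂ pvRel (l1 ++ l3) (l2 ++ l4) := by
  induction h with
  | nil => exact h2
  | cons hr _ ih => exact List.Forall₂.cons hr ih

theorem pvP1Eq {groups' : List (PySem.Set (Int × Int))} {members' : PySem.Dict Int (List (Int × Int))}
    (hf' : List.Forall₂ pvRel groups' members'.items) :
    pvProdTop3A (groups'.map (fun g => PySem.Set.len g))
      = pvProdTop3A ((members'.values).map (fun l => (l.length : Int))) := by
  congr 1
  rw [pvLens hf']
  show _ = ((members'.items.map (fun e => e.2)).map fun l => ((l.length : Int)))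
  rw [List.map_map]
  rfl

theorem pvStep_sim (cp pc : Int) (a b : Int × Int)
    (groups : List (PySem.Set (Int × Int))) (p1 p2 : Int)
    (comp : PySem.Dict (Int × Int) Int) (members : PySem.Dict Int (List (Int × Int))) (nxt : Int)
    (h : pvInv groups comp members nxt) :
    pvInv (pvAStep cp (groups, p1, p2) (pc, (a, b))).1
          (pvBStep cp (comp, members, nxt, p1, p2) (pc, (a, b))).1
          (pvBStep cp (comp, members, nxt, p1, p2) (pc, (a, b))).2.1
          (pvBStep cp (comp, members, nxt, p1, p2) (pc, (a, b))).2.2.1 ∧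
    (pvAStep cp (groups, p1, p2) (pc, (a, b))).2.1
      = (pvBStep cp (comp, members, nxt, p1, p2) (pc, (a, b))).2.2.2.1 ∧
    (pvAStep cp (groups, p1, p2) (pc, (a, b))).2.2
      = (pvBStep cp (comp, members, nxt, p1, p2) (pc, (a, b))).2.2.2.2 := by
  obtain ⟨hf, hc, hnd, hb⟩ := h
  have hlen := hf.length_eq
  simp only [pvAStep, pvBStep, pvScan_spec, List.nil_append, Bool.false_or]
  rw [pvAnyIsSome hf hc a, pvAnyIsSome hf hc b]
  rcases hra : comp.get? a with _ | i <;> rcases hrb : comp.get? b with _ | j <;>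
    simp only [Option.isSome_none, Option.isSome_some, Option.isNone_none,
      Option.isNone_some, Bool.not_true, Bool.not_false, Bool.or_true,
      Bool.or_false, if_true]
  -- case 1: neither a nor b seen before: A appends a new group, B opens component nxt
  · have hfound : List.map Prod.fst (List.filter
        (fun ig => PySem.Set.contains ig.2 a || PySem.Set.contains ig.2 b)
        (PySem.List.enumerate groups 0)) = ([] : List Int) := by
      rw [List.eq_nil_iff_forall_not_mem]
      intro y hy
      obtain ⟨k, hk, -, hpred⟩ := (pvFoundMem a b groups y).1 hy
      rw [Bool.or_eq_true] at hpred
      rcases hpred with hp | hp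
      · rw [pvContainsIff ⟨hf, hc, hnd, hb⟩ k hk (by omega) a, hra] at hp; cases hp
      · rw [pvContainsIff ⟨hf, hc, hnd, hb⟩ k hk (by omega) b, hrb] at hp; cases hp
    rw [hfound]
    simp only [List.isEmpty_nil, if_true]
    have hfresh : members.contains nxt = false := by
      rw [← Bool.not_eq_true, PySem.Dict.contains_iff_mem_keys]
      intro hmem
      obtain ⟨e, he, hke⟩ := List.mem_map.1 hmem
      exact absurd (hke ▸ hb e he) (lt_irrefl nxt)
    have hitems := PySem.Dict.items_insert_of_not_contains members
      (if (a == b) = true then [a] else [a, b]) hfresh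
    have hrelnew : pvRel (PySem.Set.ofList [a, b])
        (nxt, if (a == b) = true then [a] else [a, b]) := by
      refine ⟨PySem.Set.nodup_ofList _, ?_, ?_⟩
      · by_cases hab : a = b <;> simp [hab]
      · intro x
        rw [PySem.Set.mem_ofList]
        by_cases hab : a = b <;> simp [hab]
    have hf' : List.Forall₂ pvRel (groups ++ [PySem.Set.ofList [a, b]])
        (members.insert nxt (if (a == b) = true then [a] else [a, b])).items := by
      rw [hitems]
      exact pvForall₂Append hf (List.Forall₂.cons hrelnew List.Forall₂.nil)
    have hmemL : ∀ x : Int × Int, (x ∈ (if (a == b) = true then [a] else [a, b])) ↔ (x = a ∨ x = b) := by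
      intro x; by_cases hab : a = b <;> simp [hab]
    have hc' : ∀ (x : Int × Int) (id : Int),
        ((comp.insert a nxt).insert b nxt).get? x = some id ↔
        ∃ e ∈ (members.insert nxt (if (a == b) = true then [a] else [a, b])).items,
          e.1 = id ∧ x ∈ e.2 := by
      intro x id
      rw [hitems, PySem.Dict.get?_insert, PySem.Dict.get?_insert]
      by_cases hxb : x = b
      · rw [if_pos hxb]
        constructor
        · intro hh
          exact ⟨(nxt, if (a == b) = true then [a] else [a, b]),
            List.mem_append_right _ (by simp), (Option.some.inj hh), (hmemL x).2 (Or.inr hxb)⟩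
        · rintro ⟨e, he, hke, hxe⟩
          rcases List.mem_append.1 he with he2 | he2
          · exfalso
            have := (hc x e.1).2 ⟨e, he2, rfl, hxe⟩
            rw [hxb, hrb] at this; cases this
          · simp only [List.mem_singleton] at he2
            subst he2
            exact congrArg some hke
      · rw [if_neg hxb]
        by_cases hxa : x = a
        · rw [if_pos hxa]
          constructor
          · intro hh
            exact ⟨(nxt, if (a == b) = true then [a] else [a, b]),
              List.mem_append_right _ (by simp), (Option.some.inj hh), (hmemL x).2 (Or.inl hxa)⟩
          · rintro ⟨e, he, hke, hxe⟩
            rcases List.mem_append.1 he with he2 | he2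
            · exfalso
              have := (hc x e.1).2 ⟨e, he2, rfl, hxe⟩
              rw [hxa, hra] at this; cases this
            · simp only [List.mem_singleton] at he2
              subst he2
              exact congrArg some hke
        · rw [if_neg hxa, hc x id]
          constructor
          · rintro ⟨e, he, hke, hxe⟩
            exact ⟨e, List.mem_append_left _ he, hke, hxe⟩
          · rintro ⟨e, he, hke, hxe⟩
            rcases List.mem_append.1 he with he2 | he2
            · exact ⟨e, he2, hke, hxe⟩
            · simp only [List.mem_singleton] at he2
              subst he2
              rcases (hmemL x).1 hxe with rfl | rfl
              · exact absurd rfl hxa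
              · exact absurd rfl hxb
    have hnd' : (((members.insert nxt (if (a == b) = true then [a] else [a, b])).items).map
        (fun p => p.1)).Nodup := by
      rw [hitems, List.map_append]
      rw [List.nodup_append]
      refine ⟨hnd, by simp, ?_⟩
      intro y hy z hz
      rw [show List.map (fun p : Int × List (Int × Int) => p.1)
        [(nxt, if (a == b) = true then [a] else [a, b])] = [nxt] from rfl,
        List.mem_singleton] at hz
      obtain ⟨e, he, hke⟩ := List.mem_map.1 hy
      intro hyz
      have hlt := hb e he
      rw [hke, hyz, hz] at hlt
      exact lt_irrefl _ hlt
    have hb' : ∀ e ∈ (members.insert nxt (if (a == b) = true then [a] else [a, b])).items,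
        e.1 < nxt + 1 := by
      rw [hitems]
      intro e he
      rcases List.mem_append.1 he with he2 | he2
      · have := hb e he2; omega
      · simp only [List.mem_singleton] at he2; subst he2; exact lt_add_one _
    refine ⟨⟨hf', hc', hnd', hb'⟩, ?_, ?_⟩
    · by_cases hcp : (pc + 1 == cp) = true
      · rw [if_pos hcp, if_pos hcp]
        exact pvP1Eq hf'
      · rw [if_neg hcp, if_neg hcp]
    · trivial
  -- case 2: a unseen, b in component j: A adds a,b to b's group; B appends a to members[j]
  · obtain ⟨eb, heb, hebk, hbeb⟩ := (hc b j).1 hrb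
    obtain ⟨kb, hkb, hEb⟩ := List.mem_iff_getElem.1 heb
    have hkbg : kb < groups.length := by omega
    have hfound : List.map Prod.fst (List.filter
        (fun ig => PySem.Set.contains ig.2 a || PySem.Set.contains ig.2 b)
        (PySem.List.enumerate groups 0)) = [(kb : Int)] := by
      refine pvEqSingleton _ (pvFoundPairwise a b groups) _ ?_
      intro y
      rw [pvFoundMem]
      constructor
      · rintro ⟨k, hk, rfl, hpred⟩
        rw [Bool.or_eq_true] at hpred
        rcases hpred with hp | hp
        · rw [pvContainsIff ⟨hf, hc, hnd, hb⟩ k hk (by omega) a, hra] at hp; cases hp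
        · rw [pvContainsIff ⟨hf, hc, hnd, hb⟩ k hk (by omega) b, hrb] at hp
          have hkey : members.items[k].1 = members.items[kb].1 := by
            rw [hEb, hebk]; exact (Option.some.inj hp).symm
          rw [pvKeyPos hnd (by omega) hkb hkey]
      · rintro rfl
        refine ⟨kb, hkbg, rfl, ?_⟩
        rw [Bool.or_eq_true]
        right
        rw [pvContainsIff ⟨hf, hc, hnd, hb⟩ kb hkbg hkb b, hrb, hEb, hebk]
    rw [hfound]
    simp only [show (([(kb : Int)]).isEmpty) = false from rfl,
      show ((([(kb : Int)]).length == 1)) = true from rfl,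
      Bool.false_eq_true, if_false, if_true]
    have hidx : PySem.List.pyGetD [(kb : Int)] 0 0 = (kb : Int) := by
      rw [PySem.List.pyGetD_ofNat']; rfl
    rw [hidx, PySem.List.pyGetD_natCast, PySem.List.pySetD_natCast,
      List.getD_eq_getElem groups [] hkbg]
    have hcontj : members.contains j = true := by
      rw [PySem.Dict.contains_iff_mem_keys]
      exact List.mem_map.2 ⟨eb, heb, hebk⟩
    have hgetDj : members.getD j [] = eb.2 := by
      have hmem : (j, eb.2) ∈ members.items := by
        rw [show ((j, eb.2) : Int × List (Int × Int)) = eb by rw [← hebk]]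
        exact heb
      exact PySem.Dict.getD_of_mem_items members hmem hnd []
    have hmembers' : (members.modify j [] (fun l => l ++ [a])).items
        = members.items.set kb (j, eb.2 ++ [a]) := by
      show (members.insert j ((members.getD j []) ++ [a])).items = _
      rw [hgetDj, PySem.Dict.items_insert_of_contains _ _ hcontj]
      exact pvMapIfSet members.items j (j, eb.2 ++ [a]) kb hkb hnd (by rw [hEb, hebk])
    have hrelkb : pvRel (groups[kb]'hkbg) (members.items[kb]'hkb) :=
      List.Forall₂.get hf hkbg hkb
    rw [hEb] at hrelkb
    obtain ⟨hgnd, hend, hgm⟩ := hrelkb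
    have hanotb : a ∉ eb.2 := by
      intro hxe
      have := (hc a eb.1).2 ⟨eb, heb, rfl, hxe⟩
      rw [hra] at this; cases this
    have hbing : b ∈ groups[kb] := (hgm b).2 hbeb
    have hnodup2 : (eb.2 ++ [a]).Nodup := by
      rw [List.nodup_append]
      refine ⟨hend, by simp, ?_⟩
      intro y hy z hz hyz
      rw [List.mem_singleton] at hz
      rw [hyz, hz] at hy
      exact hanotb hy
    have hrelnew : pvRel (((groups[kb]'hkbg).add a).add b) (j, eb.2 ++ [a]) := by
      refine ⟨PySem.Set.nodup_add _ _ (PySem.Set.nodup_add _ _ hgnd), hnodup2, ?_⟩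
      intro x
      rw [PySem.Set.mem_add, PySem.Set.mem_add, List.mem_append, List.mem_singleton]
      constructor
      · rintro ((hx | rfl) | rfl)
        · exact Or.inl ((hgm x).1 hx)
        · exact Or.inr rfl
        · exact Or.inl hbeb
      · rintro (hx | rfl)
        · exact Or.inl (Or.inl ((hgm x).2 hx))
        · exact Or.inl (Or.inr rfl)
    have hf' : List.Forall₂ pvRel (groups.set kb (((groups[kb]'hkbg).add a).add b))
        (members.modify j [] (fun l => l ++ [a])).items := by
      rw [hmembers']
      exact pvForall₂Set hf hrelnew
    have hc' : ∀ (x : Int × Int) (id : Int),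
        (comp.insert a j).get? x = some id ↔
        ∃ e ∈ (members.modify j [] (fun l => l ++ [a])).items, e.1 = id ∧ x ∈ e.2 := by
      intro x id
      rw [hmembers', PySem.Dict.get?_insert,
        pvExistsMemSet members.items kb hkb (j, eb.2 ++ [a]) (fun e => e.1 = id ∧ x ∈ e.2)]
      by_cases hxa : x = a
      · rw [if_pos hxa]
        constructor
        · intro hh
          exact Or.inl ⟨Option.some.inj hh, by
            rw [List.mem_append, List.mem_singleton]; exact Or.inr hxa⟩
        · rintro (⟨hid, -⟩ | ⟨k', hk', hne, hkey', hxk'⟩)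
          · exact congrArg some hid
          · exfalso
            have := (hc x members.items[k'].1).2 ⟨members.items[k'], List.getElem_mem _, rfl, hxk'⟩
            rw [hxa, hra] at this; cases this
      · rw [if_neg hxa, hc x id]
        constructor
        · rintro ⟨e, he, hke, hxe⟩
          obtain ⟨k0, hk0, hE0⟩ := List.mem_iff_getElem.1 he
          by_cases hk0kb : k0 = kb
          · subst hk0kb
            have hee : e = eb := by rw [← hE0, hEb]
            rw [hee] at hke hxe
            refine Or.inl ⟨?_, ?_⟩
            · show j = id
              rw [← hebk]; exact hke
            · rw [List.mem_append]
              exact Or.inl hxe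
          · exact Or.inr ⟨k0, hk0, hk0kb, by rw [hE0]; exact ⟨hke, hxe⟩⟩
        · rintro (⟨hid, hxm⟩ | ⟨k', hk', hne, hkey', hxk'⟩)
          · rw [List.mem_append, List.mem_singleton] at hxm
            rcases hxm with hxm | rfl
            · exact ⟨eb, heb, by rw [hebk]; exact hid, hxm⟩
            · exact absurd rfl hxa
          · exact ⟨members.items[k'], List.getElem_mem _, hkey', hxk'⟩
    have hnd' : (((members.modify j [] (fun l => l ++ [a])).items).map (fun p => p.1)).Nodup := by
      rw [hmembers', List.map_set]
      have : (List.map (fun p => p.1) members.items)[kb]'(by simpa using hkb)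
          = (j, eb.2 ++ [a]).1 := by
        simp only [List.getElem_map]
        rw [hEb, hebk]
      rw [← this, List.set_getElem_self]
      exact hnd
    have hb' : ∀ e ∈ (members.modify j [] (fun l => l ++ [a])).items, e.1 < nxt := by
      rw [hmembers']
      intro e he
      rcases (pvExistsMemSet members.items kb hkb (j, eb.2 ++ [a]) (fun e' => e' = e)).1
        ⟨e, he, rfl⟩ with hw | ⟨k', hk', -, hE'⟩
      · rw [← hw]
        show j < nxt
        rw [← hebk]
        exact hb eb heb
      · rw [← hE']
        exact hb _ (List.getElem_mem _)
    refine ⟨⟨hf', hc', hnd', hb'⟩, ?_, ?_⟩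
    · by_cases hcp : (pc + 1 == cp) = true
      · rw [if_pos hcp, if_pos hcp]
        exact pvP1Eq hf'
      · rw [if_neg hcp, if_neg hcp]
    · trivial
  -- case 3: b unseen, a in component i: A adds a,b to a's group; B appends b to members[i]
  · obtain ⟨ea, hea, heak, haea⟩ := (hc a i).1 hra
    obtain ⟨ka, hka, hEa⟩ := List.mem_iff_getElem.1 hea
    have hkag : ka < groups.length := by omega
    have hfound : List.map Prod.fst (List.filter
        (fun ig => PySem.Set.contains ig.2 a || PySem.Set.contains ig.2 b)
        (PySem.List.enumerate groups 0)) = [(ka : Int)] := by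
      refine pvEqSingleton _ (pvFoundPairwise a b groups) _ ?_
      intro y
      rw [pvFoundMem]
      constructor
      · rintro ⟨k, hk, rfl, hpred⟩
        rw [Bool.or_eq_true] at hpred
        rcases hpred with hp | hp
        · rw [pvContainsIff ⟨hf, hc, hnd, hb⟩ k hk (by omega) a, hra] at hp
          have hkey : members.items[k].1 = members.items[ka].1 := by
            rw [hEa, heak]; exact (Option.some.inj hp).symm
          rw [pvKeyPos hnd (by omega) hka hkey]
        · rw [pvContainsIff ⟨hf, hc, hnd, hb⟩ k hk (by omega) b, hrb] at hp; cases hp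
      · rintro rfl
        refine ⟨ka, hkag, rfl, ?_⟩
        rw [Bool.or_eq_true]
        left
        rw [pvContainsIff ⟨hf, hc, hnd, hb⟩ ka hkag hka a, hra, hEa, heak]
    rw [hfound]
    simp only [show (([(ka : Int)]).isEmpty) = false from rfl,
      show ((([(ka : Int)]).length == 1)) = true from rfl,
      Bool.false_eq_true, if_false, if_true]
    have hidx : PySem.List.pyGetD [(ka : Int)] 0 0 = (ka : Int) := by
      rw [PySem.List.pyGetD_ofNat']; rfl
    rw [hidx, PySem.List.pyGetD_natCast, PySem.List.pySetD_natCast,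
      List.getD_eq_getElem groups [] hkag]
    have hconti : members.contains i = true := by
      rw [PySem.Dict.contains_iff_mem_keys]
      exact List.mem_map.2 ⟨ea, hea, heak⟩
    have hgetDi : members.getD i [] = ea.2 := by
      have hmem : (i, ea.2) ∈ members.items := by
        rw [show ((i, ea.2) : Int × List (Int × Int)) = ea by rw [← heak]]
        exact hea
      exact PySem.Dict.getD_of_mem_items members hmem hnd []
    have hmembers' : (members.modify i [] (fun l => l ++ [b])).items
        = members.items.set ka (i, ea.2 ++ [b]) := by
      show (members.insert i ((members.getD i []) ++ [b])).items = _
      rw [hgetDi, PySem.Dict.items_insert_of_contains _ _ hconti]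
      exact pvMapIfSet members.items i (i, ea.2 ++ [b]) ka hka hnd (by rw [hEa, heak])
    have hrelka : pvRel (groups[ka]'hkag) (members.items[ka]'hka) :=
      List.Forall₂.get hf hkag hka
    rw [hEa] at hrelka
    obtain ⟨hgnd, hend, hgm⟩ := hrelka
    have hbnota : b ∉ ea.2 := by
      intro hxe
      have := (hc b ea.1).2 ⟨ea, hea, rfl, hxe⟩
      rw [hrb] at this; cases this
    have haing : a ∈ groups[ka] := (hgm a).2 haea
    have hnodup2 : (ea.2 ++ [b]).Nodup := by
      rw [List.nodup_append]
      refine ⟨hend, by simp, ?_⟩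
      intro y hy z hz hyz
      rw [List.mem_singleton] at hz
      rw [hyz, hz] at hy
      exact hbnota hy
    have hrelnew : pvRel (((groups[ka]'hkag).add a).add b) (i, ea.2 ++ [b]) := by
      refine ⟨PySem.Set.nodup_add _ _ (PySem.Set.nodup_add _ _ hgnd), hnodup2, ?_⟩
      intro x
      rw [PySem.Set.mem_add, PySem.Set.mem_add, List.mem_append, List.mem_singleton]
      constructor
      · rintro ((hx | rfl) | rfl)
        · exact Or.inl ((hgm x).1 hx)
        · exact Or.inl haea
        · exact Or.inr rfl
      · rintro (hx | rfl)
        · exact Or.inl (Or.inl ((hgm x).2 hx))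
        · exact Or.inr rfl
    have hf' : List.Forall₂ pvRel (groups.set ka (((groups[ka]'hkag).add a).add b))
        (members.modify i [] (fun l => l ++ [b])).items := by
      rw [hmembers']
      exact pvForall₂Set hf hrelnew
    have hc' : ∀ (x : Int × Int) (id : Int),
        (comp.insert b i).get? x = some id ↔
        ∃ e ∈ (members.modify i [] (fun l => l ++ [b])).items, e.1 = id ∧ x ∈ e.2 := by
      intro x id
      rw [hmembers', PySem.Dict.get?_insert,
        pvExistsMemSet members.items ka hka (i, ea.2 ++ [b]) (fun e => e.1 = id ∧ x ∈ e.2)]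
      by_cases hxb : x = b
      · rw [if_pos hxb]
        constructor
        · intro hh
          exact Or.inl ⟨Option.some.inj hh, by
            rw [List.mem_append, List.mem_singleton]; exact Or.inr hxb⟩
        · rintro (⟨hid, -⟩ | ⟨k', hk', hne, hkey', hxk'⟩)
          · exact congrArg some hid
          · exfalso
            have := (hc x members.items[k'].1).2 ⟨members.items[k'], List.getElem_mem _, rfl, hxk'⟩
            rw [hxb, hrb] at this; cases this
      · rw [if_neg hxb, hc x id]
        constructor
        · rintro ⟨e, he, hke, hxe⟩
          obtain ⟨k0, hk0, hE0⟩ := List.mem_iff_getElem.1 he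
          by_cases hk0ka : k0 = ka
          · subst hk0ka
            have hee : e = ea := by rw [← hE0, hEa]
            rw [hee] at hke hxe
            refine Or.inl ⟨?_, ?_⟩
            · show i = id
              rw [← heak]; exact hke
            · rw [List.mem_append]
              exact Or.inl hxe
          · exact Or.inr ⟨k0, hk0, hk0ka, by rw [hE0]; exact ⟨hke, hxe⟩⟩
        · rintro (⟨hid, hxm⟩ | ⟨k', hk', hne, hkey', hxk'⟩)
          · rw [List.mem_append, List.mem_singleton] at hxm
            rcases hxm with hxm | rfl
            · exact ⟨ea, hea, by rw [heak]; exact hid, hxm⟩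
            · exact absurd rfl hxb
          · exact ⟨members.items[k'], List.getElem_mem _, hkey', hxk'⟩
    have hnd' : (((members.modify i [] (fun l => l ++ [b])).items).map (fun p => p.1)).Nodup := by
      rw [hmembers', List.map_set]
      have : (List.map (fun p => p.1) members.items)[ka]'(by simpa using hka)
          = (i, ea.2 ++ [b]).1 := by
        simp only [List.getElem_map]
        rw [hEa, heak]
      rw [← this, List.set_getElem_self]
      exact hnd
    have hb' : ∀ e ∈ (members.modify i [] (fun l => l ++ [b])).items, e.1 < nxt := by
      rw [hmembers']
      intro e he
      rcases (pvExistsMemSet members.items ka hka (i, ea.2 ++ [b]) (fun e' => e' = e)).1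
        ⟨e, he, rfl⟩ with hw | ⟨k', hk', -, hE'⟩
      · rw [← hw]
        show i < nxt
        rw [← heak]
        exact hb ea hea
      · rw [← hE']
        exact hb _ (List.getElem_mem _)
    refine ⟨⟨hf', hc', hnd', hb'⟩, ?_, ?_⟩
    · by_cases hcp : (pc + 1 == cp) = true
      · rw [if_pos hcp, if_pos hcp]
        exact pvP1Eq hf'
      · rw [if_neg hcp, if_neg hcp]
    · trivial
  -- case 4: a in component i, b in component j
  · obtain ⟨ea, hea, heak, haea⟩ := (hc a i).1 hra
    obtain ⟨ka, hka, hEa⟩ := List.mem_iff_getElem.1 hea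
    obtain ⟨eb, heb, hebk, hbeb⟩ := (hc b j).1 hrb
    obtain ⟨kb, hkb, hEb⟩ := List.mem_iff_getElem.1 heb
    have hkag : ka < groups.length := by omega
    have hkbg : kb < groups.length := by omega
    have hrela : pvRel (groups[ka]'hkag) (members.items[ka]'hka) := List.Forall₂.get hf hkag hka
    have hrelb : pvRel (groups[kb]'hkbg) (members.items[kb]'hkb) := List.Forall₂.get hf hkbg hkb
    rw [hEa] at hrela
    rw [hEb] at hrelb
    by_cases hij : i = j
    · -- same component: A re-adds both elements (no change), B does nothing
      have heab : ea = eb := pvKeyInj hnd hea heb (by rw [heak, hebk, hij])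
      have hkakb : ka = kb := pvKeyPos hnd hka hkb (by rw [hEa, hEb, heab])
      subst hkakb
      have hfound : List.map Prod.fst (List.filter
          (fun ig => PySem.Set.contains ig.2 a || PySem.Set.contains ig.2 b)
          (PySem.List.enumerate groups 0)) = [(ka : Int)] := by
        refine pvEqSingleton _ (pvFoundPairwise a b groups) _ ?_
        intro y
        rw [pvFoundMem]
        constructor
        · rintro ⟨k, hk, rfl, hpred⟩
          rw [Bool.or_eq_true] at hpred
          rcases hpred with hp | hp
          · rw [pvContainsIff ⟨hf, hc, hnd, hb⟩ k hk (by omega) a, hra] at hp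
            have hkey : members.items[k].1 = members.items[ka].1 := by
              rw [hEa, heak]; exact (Option.some.inj hp).symm
            rw [pvKeyPos hnd (by omega) hka hkey]
          · rw [pvContainsIff ⟨hf, hc, hnd, hb⟩ k hk (by omega) b, hrb] at hp
            have hkey : members.items[k].1 = members.items[ka].1 := by
              rw [hEa, heak]
              have hkj : members.items[k].1 = j := (Option.some.inj hp).symm
              rw [hkj, ← hij]
            rw [pvKeyPos hnd (by omega) hka hkey]
        · rintro rfl
          refine ⟨ka, hkag, rfl, ?_⟩
          rw [Bool.or_eq_true]
          left
          rw [pvContainsIff ⟨hf, hc, hnd, hb⟩ ka hkag hka a, hra, hEa, heak]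
      rw [hfound]
      simp only [show (([(ka : Int)]).isEmpty) = false from rfl,
        show ((([(ka : Int)]).length == 1)) = true from rfl,
        show (i == j) = true from by rw [hij]; simp,
        Bool.false_eq_true, if_false, if_true]
      have hidx : PySem.List.pyGetD [(ka : Int)] 0 0 = (ka : Int) := by
        rw [PySem.List.pyGetD_ofNat']; rfl
      rw [hidx, PySem.List.pyGetD_natCast, PySem.List.pySetD_natCast,
        List.getD_eq_getElem groups [] hkag]
      have hnoc : ((groups[ka]'hkag).add a).add b = groups[ka]'hkag := by
        rw [PySem.Set.add_of_mem ((hrela.2.2 a).2 haea),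
          PySem.Set.add_of_mem ((hrela.2.2 b).2 (by rw [heab]; exact hbeb))]
      rw [hnoc, List.set_getElem_self]
      refine ⟨⟨hf, hc, hnd, hb⟩, ?_, ?_⟩
      · by_cases hcp : (pc + 1 == cp) = true
        · rw [if_pos hcp, if_pos hcp]
          exact pvP1Eq hf
        · rw [if_neg hcp, if_neg hcp]
      · trivial
    · -- distinct components: A pops both groups and appends their union; B reindexes both
      -- member lists under the fresh id nxt
      have hkanekb : ka ≠ kb := by
        intro hh
        apply hij
        subst hh
        rw [← heak, ← hebk, ← hEa, ← hEb]
      -- the two touched positions, ordered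
      obtain ⟨u, v, huv, hvlen, hulen, hset⟩ :
          ∃ u v : Nat, u < v ∧ v < groups.length ∧ u < groups.length ∧
            ((u = ka ∧ v = kb) ∨ (u = kb ∧ v = ka)) := by
        rcases Nat.lt_or_ge ka kb with hlt | hge
        · exact ⟨ka, kb, hlt, hkbg, hkag, Or.inl ⟨rfl, rfl⟩⟩
        · exact ⟨kb, ka, by omega, hkag, hkbg, Or.inr ⟨rfl, rfl⟩⟩
      have hsetiff : ∀ k : Nat, (k = ka ∨ k = kb) ↔ (k = u ∨ k = v) := by
        rcases hset with ⟨h1, h2⟩ | ⟨h1, h2⟩ <;> intro k <;> omega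
      have hpredab : ∀ (k : Nat) (hk : k < groups.length), k = ka ∨ k = kb →
          ((PySem.Set.contains (groups[k]'hk) a || PySem.Set.contains (groups[k]'hk) b) = true) := by
        rintro k hk (rfl | rfl) <;> rw [Bool.or_eq_true]
        · left
          rw [pvContainsIff ⟨hf, hc, hnd, hb⟩ k hk hka a, hra, hEa, heak]
        · right
          rw [pvContainsIff ⟨hf, hc, hnd, hb⟩ k hk hkb b, hrb, hEb, hebk]
      have hpred : ∀ (k : Nat) (hk : k < groups.length),
          ((PySem.Set.contains (groups[k]'hk) a || PySem.Set.contains (groups[k]'hk) b) = true)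
            ↔ (k = u ∨ k = v) := by
        intro k hk
        rw [← hsetiff k]
        constructor
        · intro hp
          rw [Bool.or_eq_true] at hp
          rcases hp with hp | hp
          · rw [pvContainsIff ⟨hf, hc, hnd, hb⟩ k hk (by omega) a, hra] at hp
            have hkey : members.items[k].1 = members.items[ka].1 := by
              rw [hEa, heak]; exact (Option.some.inj hp).symm
            exact Or.inl (pvKeyPos hnd (by omega) hka hkey)
          · rw [pvContainsIff ⟨hf, hc, hnd, hb⟩ k hk (by omega) b, hrb] at hp
            have hkey : members.items[k].1 = members.items[kb].1 := by
              rw [hEb, hebk]; exact (Option.some.inj hp).symm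
            exact Or.inr (pvKeyPos hnd (by omega) hkb hkey)
        · exact hpredab k hk
      have hfound : List.map Prod.fst (List.filter
          (fun ig => PySem.Set.contains ig.2 a || PySem.Set.contains ig.2 b)
          (PySem.List.enumerate groups 0)) = [(u : Int), (v : Int)] := by
        refine pvEqPair _ (pvFoundPairwise a b groups) _ _ (by exact_mod_cast huv) ?_
        intro y
        rw [pvFoundMem]
        constructor
        · rintro ⟨k, hk, rfl, hp⟩
          rcases (hpred k hk).1 hp with rfl | rfl
          · exact Or.inl rfl
          · exact Or.inr rfl
        · rintro (rfl | rfl)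
          · exact ⟨u, hulen, rfl, (hpred u hulen).2 (Or.inl rfl)⟩
          · exact ⟨v, hvlen, rfl, (hpred v hvlen).2 (Or.inr rfl)⟩
      rw [hfound]
      simp only [show (([(u : Int), (v : Int)]).isEmpty) = false from rfl,
        show ((([(u : Int), (v : Int)]).length == 1)) = false from rfl,
        show (i == j) = false from beq_eq_false_iff_ne.2 hij,
        Bool.false_eq_true, if_false]
      have hsorted : PySem.List.sorted [(u : Int), (v : Int)] (fun x => x) true
          = [(v : Int), (u : Int)] := by
        refine PySem.List.sorted_rev_eq_of_perm_of_pairwise_gt _ _ _ (List.Perm.swap _ _ _) ?_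
        refine List.pairwise_cons.2 ⟨?_, List.pairwise_singleton _ _⟩
        intro y hy
        rw [List.mem_singleton] at hy
        subst hy
        exact_mod_cast huv
      rw [hsorted]
      have hlen2 : u < (groups.eraseIdx v).length := by
        rw [List.length_eraseIdx_of_lt hvlen]; omega
      have hgeteq : (groups.eraseIdx v)[u]'hlen2 = groups[u]'hulen := by
        rw [List.getElem_eraseIdx]
        rw [dif_pos huv]
      have hfoldeq : List.foldl
          (fun (mg : PySem.Set (Int × Int) × List (PySem.Set (Int × Int))) idx =>
            match PySem.List.pop? mg.2 idx with
            | some r => (mg.1.update r.1, r.2)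
            | none => mg)
          (PySem.Set.empty, groups) [(v : Int), (u : Int)]
          = ((PySem.Set.update (PySem.Set.update PySem.Set.empty (groups[v]'hvlen))
              (groups[u]'hulen)), (groups.eraseIdx v).eraseIdx u) := by
        simp only [List.foldl_cons, List.foldl_nil,
          PySem.List.pop?_natCast groups v hvlen,
          PySem.List.pop?_natCast (groups.eraseIdx v) u hlen2, hgeteq]
      rw [hfoldeq]
      have herase : (groups.eraseIdx v).eraseIdx u
          = groups.filter (fun g => !(PySem.Set.contains g a || PySem.Set.contains g b)) :=
        pvEraseIdxFilter₂ _ groups u v huv hvlen hpred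
      rw [herase]
      -- B side
      have hla : members.getD i [] = ea.2 := by
        have hmem : (i, ea.2) ∈ members.items := by
          rw [show ((i, ea.2) : Int × List (Int × Int)) = ea by rw [← heak]]
          exact hea
        exact PySem.Dict.getD_of_mem_items members hmem hnd []
      have herase1 : (members.erase i).items
          = members.items.filter (fun p => !(p.1 == i)) := rfl
      have hkeys1 : ((members.erase i).items.map (fun p => p.1)).Nodup := by
        rw [herase1]
        exact List.Nodup.sublist (List.Sublist.map _ List.filter_sublist) hnd
      have hlb : (members.erase i).getD j [] = eb.2 := by
        have hmem : (j, eb.2) ∈ (members.erase i).items := by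
          rw [herase1, List.mem_filter]
          constructor
          · rw [show ((j, eb.2) : Int × List (Int × Int)) = eb by rw [← hebk]]
            exact heb
          · simp only [Bool.not_eq_true', beq_eq_false_iff_ne]
            exact Ne.symm hij
        exact PySem.Dict.getD_of_mem_items (members.erase i) hmem hkeys1 []
      rw [hla, hlb]
      have hdisj : ∀ x : Int × Int, x ∈ ea.2 → x ∈ eb.2 → False := by
        intro x h1 h2
        have hx1 := (hc x ea.1).2 ⟨ea, hea, rfl, h1⟩
        have hx2 := (hc x eb.1).2 ⟨eb, heb, rfl, h2⟩
        rw [hx1] at hx2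
        exact hij (by rw [← heak, ← hebk, Option.some.inj hx2])
      have hguv : ∀ x : Int × Int,
          (x ∈ (groups[u]'hulen) ∨ x ∈ (groups[v]'hvlen)) ↔ (x ∈ ea.2 ∨ x ∈ eb.2) := by
        rcases hset with ⟨h1, h2⟩ | ⟨h1, h2⟩
        · intro x
          rw [show (groups[u]'hulen) = (groups[ka]'hkag) from getElem_congr rfl h1 (by omega),
            show (groups[v]'hvlen) = (groups[kb]'hkbg) from getElem_congr rfl h2 (by omega),
            hrela.2.2 x, hrelb.2.2 x]
        · intro x
          rw [show (groups[u]'hulen) = (groups[kb]'hkbg) from getElem_congr rfl h1 (by omega),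
            show (groups[v]'hvlen) = (groups[ka]'hkag) from getElem_congr rfl h2 (by omega),
            hrelb.2.2 x, hrela.2.2 x]
          exact or_comm
      have hrelnew : pvRel
          ((((PySem.Set.empty.update (groups[v]'hvlen)).update (groups[u]'hulen)).add a).add b)
          (nxt, ea.2 ++ eb.2) := by
        refine ⟨PySem.Set.nodup_add _ _ (PySem.Set.nodup_add _ _
          (PySem.Set.nodup_update _ _ (PySem.Set.nodup_update _ _ List.nodup_nil))), ?_, ?_⟩
        · rw [List.nodup_append]
          refine ⟨hrela.2.1, hrelb.2.1, ?_⟩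
          intro y hy z hz hyz
          rw [hyz] at hy
          exact hdisj z hy hz
        · intro x
          rw [PySem.Set.mem_add, PySem.Set.mem_add, PySem.Set.mem_update, PySem.Set.mem_update,
            List.mem_append]
          constructor
          · rintro ((((hx | hx) | hx) | rfl) | rfl)
            · exact absurd hx (List.not_mem_nil)
            · exact (hguv x).1 (Or.inr hx)
            · exact (hguv x).1 (Or.inl hx)
            · exact Or.inl haea
            · exact Or.inr hbeb
          · intro hx
            rcases (hguv x).2 hx with hx2 | hx2
            · exact Or.inl (Or.inl (Or.inr hx2))
            · exact Or.inl (Or.inl (Or.inl (Or.inr hx2)))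
      have hitems2 : ((members.erase i).erase j).items
          = members.items.filter (fun p => !(p.1 == j) && !(p.1 == i)) := by
        show List.filter (fun p => !(p.1 == j)) ((members.erase i).items) = _
        rw [herase1, List.filter_filter]
      have hfilterAB : List.Forall₂ pvRel
          (List.filter (fun g => !(PySem.Set.contains g a || PySem.Set.contains g b)) groups)
          (members.items.filter (fun p => !(p.1 == j) && !(p.1 == i))) := by
        refine pvForall₂Filter _ _ hf ?_
        intro g e hr he
        have hiff : (PySem.Set.contains g a || PySem.Set.contains g b)
            = ((e.1 == j) || (e.1 == i)) := by
          rw [Bool.eq_iff_iff, Bool.or_eq_true, Bool.or_eq_true]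
          constructor
          · rintro (hp | hp)
            · right
              rw [PySem.Set.contains_iff] at hp
              have := (hc a e.1).2 ⟨e, he, rfl, (hr.2.2 a).1 hp⟩
              rw [hra] at this
              rw [beq_iff_eq]
              exact (Option.some.inj this).symm
            · left
              rw [PySem.Set.contains_iff] at hp
              have := (hc b e.1).2 ⟨e, he, rfl, (hr.2.2 b).1 hp⟩
              rw [hrb] at this
              rw [beq_iff_eq]
              exact (Option.some.inj this).symm
          · rintro (hp | hp)
            · rw [beq_iff_eq] at hp
              have hee : e = eb := pvKeyInj hnd he heb (by rw [hp, hebk])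
              right
              rw [PySem.Set.contains_iff]
              exact (hr.2.2 b).2 (by rw [hee]; exact hbeb)
            · rw [beq_iff_eq] at hp
              have hee : e = ea := pvKeyInj hnd he hea (by rw [hp, heak])
              left
              rw [PySem.Set.contains_iff]
              exact (hr.2.2 a).2 (by rw [hee]; exact haea)
        show (!(PySem.Set.contains g a || PySem.Set.contains g b))
            = (!(e.1 == j) && !(e.1 == i))
        rw [hiff, Bool.not_or]
      have hfreshnxt : ((members.erase i).erase j).contains nxt = false := by
        rw [← Bool.not_eq_true, PySem.Dict.contains_iff_mem_keys]
        intro hmem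
        obtain ⟨e, he, hke⟩ := List.mem_map.1 hmem
        rw [hitems2] at he
        have := hb e (List.mem_of_mem_filter he)
        rw [hke] at this
        exact lt_irrefl _ this
      have hitems' : (((members.erase i).erase j).insert nxt (ea.2 ++ eb.2)).items
          = members.items.filter (fun p => !(p.1 == j) && !(p.1 == i)) ++ [(nxt, ea.2 ++ eb.2)] := by
        rw [PySem.Dict.items_insert_of_not_contains _ _ hfreshnxt, hitems2]
      have hf' : List.Forall₂ pvRel
          (List.filter (fun g => !(PySem.Set.contains g a || PySem.Set.contains g b)) groups ++
            [(((PySem.Set.empty.update (groups[v]'hvlen)).update (groups[u]'hulen)).add a).add b])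
          (((members.erase i).erase j).insert nxt (ea.2 ++ eb.2)).items := by
        rw [hitems']
        exact pvForall₂Append hfilterAB (List.Forall₂.cons hrelnew List.Forall₂.nil)
      have hc' : ∀ (x : Int × Int) (id : Int),
          (List.foldl (fun c x => c.insert x nxt) comp (ea.2 ++ eb.2)).get? x = some id ↔
          ∃ e ∈ (((members.erase i).erase j).insert nxt (ea.2 ++ eb.2)).items,
            e.1 = id ∧ x ∈ e.2 := by
        intro x id
        rw [pvGetFoldlInsert, hitems']
        by_cases hxm : x ∈ ea.2 ++ eb.2
        · rw [if_pos hxm]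
          constructor
          · intro hh
            exact ⟨(nxt, ea.2 ++ eb.2), List.mem_append_right _ (by simp),
              Option.some.inj hh, hxm⟩
          · rintro ⟨e, he, hke, hxe⟩
            rcases List.mem_append.1 he with he2 | he2
            · exfalso
              have hpred2 := List.of_mem_filter he2
              rw [Bool.and_eq_true, Bool.not_eq_true', Bool.not_eq_true',
                beq_eq_false_iff_ne, beq_eq_false_iff_ne] at hpred2
              have hcompx := (hc x e.1).2 ⟨e, List.mem_of_mem_filter he2, rfl, hxe⟩
              rcases List.mem_append.1 hxm with hx2 | hx2
              · have := (hc x ea.1).2 ⟨ea, hea, rfl, hx2⟩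
                rw [hcompx] at this
                exact hpred2.2 (by rw [Option.some.inj this, heak])
              · have := (hc x eb.1).2 ⟨eb, heb, rfl, hx2⟩
                rw [hcompx] at this
                exact hpred2.1 (by rw [Option.some.inj this, hebk])
            · simp only [List.mem_singleton] at he2
              subst he2
              exact congrArg some hke
        · rw [if_neg hxm, hc x id]
          constructor
          · rintro ⟨e, he, hke, hxe⟩
            have hkei : e.1 ≠ i := by
              intro hh
              have hee : e = ea := pvKeyInj hnd he hea (by rw [hh, heak])
              exact hxm (List.mem_append_left _ (by rw [← hee]; exact hxe))
            have hkej : e.1 ≠ j := by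
              intro hh
              have hee : e = eb := pvKeyInj hnd he heb (by rw [hh, hebk])
              exact hxm (List.mem_append_right _ (by rw [← hee]; exact hxe))
            refine ⟨e, List.mem_append_left _ (List.mem_filter.2 ⟨he, ?_⟩), hke, hxe⟩
            rw [Bool.and_eq_true, Bool.not_eq_true', Bool.not_eq_true',
              beq_eq_false_iff_ne, beq_eq_false_iff_ne]
            exact ⟨hkej, hkei⟩
          · rintro ⟨e, he, hke, hxe⟩
            rcases List.mem_append.1 he with he2 | he2
            · exact ⟨e, List.mem_of_mem_filter he2, hke, hxe⟩
            · simp only [List.mem_singleton] at he2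
              subst he2
              exact absurd hxe hxm
      have hnd' : ((((members.erase i).erase j).insert nxt (ea.2 ++ eb.2)).items.map
          (fun p => p.1)).Nodup := by
        rw [hitems', List.map_append, List.nodup_append]
        refine ⟨List.Nodup.sublist (List.Sublist.map _ List.filter_sublist) hnd, by simp, ?_⟩
        intro y hy z hz hyz
        obtain ⟨e, he, hke⟩ := List.mem_map.1 hy
        rw [show List.map (fun p : Int × List (Int × Int) => p.1) [(nxt, ea.2 ++ eb.2)]
          = [nxt] from rfl, List.mem_singleton] at hz
        have := hb e (List.mem_of_mem_filter he)
        rw [hke, hyz, hz] at this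
        exact lt_irrefl _ this
      have hb' : ∀ e ∈ (((members.erase i).erase j).insert nxt (ea.2 ++ eb.2)).items,
          e.1 < nxt + 1 := by
        rw [hitems']
        intro e he
        rcases List.mem_append.1 he with he2 | he2
        · have := hb e (List.mem_of_mem_filter he2); omega
        · simp only [List.mem_singleton] at he2; subst he2; exact lt_add_one _
      refine ⟨⟨hf', hc', hnd', hb'⟩, ?_, ?_⟩
      · by_cases hcp : (pc + 1 == cp) = true
        · rw [if_pos hcp, if_pos hcp]
          exact pvP1Eq hf'
        · rw [if_neg hcp, if_neg hcp]
      · trivial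

theorem pvFold_sim (cp : Int) (pairs : List ((Int × Int) × (Int × Int))) : ∀ (s : Int)
    (groups : List (PySem.Set (Int × Int))) (p1 p2 : Int)
    (comp : PySem.Dict (Int × Int) Int) (members : PySem.Dict Int (List (Int × Int))) (nxt : Int),
    pvInv groups comp members nxt →
    pvInv ((PySem.List.enumerate pairs s).foldl (pvAStep cp) (groups, p1, p2)).1
          ((PySem.List.enumerate pairs s).foldl (pvBStep cp) (comp, members, nxt, p1, p2)).1
          ((PySem.List.enumerate pairs s).foldl (pvBStep cp) (comp, members, nxt, p1, p2)).2.1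
          ((PySem.List.enumerate pairs s).foldl (pvBStep cp) (comp, members, nxt, p1, p2)).2.2.1 ∧
    ((PySem.List.enumerate pairs s).foldl (pvAStep cp) (groups, p1, p2)).2.1
      = ((PySem.List.enumerate pairs s).foldl (pvBStep cp) (comp, members, nxt, p1, p2)).2.2.2.1 ∧
    ((PySem.List.enumerate pairs s).foldl (pvAStep cp) (groups, p1, p2)).2.2
      = ((PySem.List.enumerate pairs s).foldl (pvBStep cp) (comp, members, nxt, p1, p2)).2.2.2.2 := by
  induction pairs with
  | nil => intro s groups p1 p2 comp members nxt h; exact ⟨h, rfl, rfl⟩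
  | cons pr t ih =>
    intro s groups p1 p2 comp members nxt h
    rw [PySem.List.enumerate_cons]
    simp only [List.foldl_cons]
    obtain ⟨hI, h1, h2⟩ := pvStep_sim cp s pr.1 pr.2 groups p1 p2 comp members nxt h
    have hrec := ih (s + 1)
      (pvAStep cp (groups, p1, p2) (s, pr)).1
      (pvAStep cp (groups, p1, p2) (s, pr)).2.1
      (pvAStep cp (groups, p1, p2) (s, pr)).2.2
      (pvBStep cp (comp, members, nxt, p1, p2) (s, pr)).1
      (pvBStep cp (comp, members, nxt, p1, p2) (s, pr)).2.1
      (pvBStep cp (comp, members, nxt, p1, p2) (s, pr)).2.2.1 hI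
    have eB : ((pvBStep cp (comp, members, nxt, p1, p2) (s, pr)).1,
        (pvBStep cp (comp, members, nxt, p1, p2) (s, pr)).2.1,
        (pvBStep cp (comp, members, nxt, p1, p2) (s, pr)).2.2.1,
        (pvAStep cp (groups, p1, p2) (s, pr)).2.1,
        (pvAStep cp (groups, p1, p2) (s, pr)).2.2)
        = pvBStep cp (comp, members, nxt, p1, p2) (s, pr) := by
      rw [h1, h2]
    rw [eB] at hrec
    exact hrec

-- ===== VERDICT (by name: the statement is the Claim_ definition above) =====
theorem group_connected_pairs_spec : Claim_equal_group_connected_pairs := by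
  intro pairs checkpoint _
  unfold Spec_group_connected_pairs group_connected_pairs group_connected_pairs_alt
  have h := pvFold_sim checkpoint pairs 0 [] 0 0 PySem.Dict.empty PySem.Dict.empty 0
    (by
      refine ⟨List.Forall₂.nil, ?_, ?_, ?_⟩
      · intro x id
        constructor
        · intro hx; simp [PySem.Dict.get?, PySem.Dict.empty] at hx
        · rintro ⟨e, he, -⟩; simp [PySem.Dict.empty] at he
      · simp [PySem.Dict.empty]
      · intro e he; simp [PySem.Dict.empty] at he)
  exact Prod.ext h.2.1 h.2.2
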